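-- pv_equiv track=rewrite | github.com/djr812/Darts501 | app/routes/api/shanghai.py | _check_tie_winner
-- ===== SOURCE A (Python) =====
-- def _check_tie_winner(scores, tiebreak_rounds):
--     """
--     Given tiebreak round results {player_id: score}, return the winner.
--     50 (inner bull) > 25 (outer bull) > 0 (miss).
--     Returns winning player_id, or None if still tied.
--     """
--     if not tiebreak_rounds:
--         return None
--     max_score = max(tiebreak_rounds.values())
--     winners = [pid for pid, s in tiebreak_rounds.items() if s == max_score]
--     if len(winners) == 1:
--         return winners[0]
--     return None  # still tied
-- ===== SOURCE B (Python) =====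
-- def _check_tie_winner(scores, tiebreak_rounds):
--     """Single-pass tiebreak winner: track best pid, best score and tie count."""
--     if not tiebreak_rounds:
--         return None
--     items = iter(tiebreak_rounds.items())
--     best_pid, best_score = next(items)
--     count = 1
--     for pid, s in items:
--         if s > best_score:
--             best_pid, best_score, count = pid, s, 1
--         elif s == best_score:
--             count += 1
--     return best_pid if count == 1 else None
-- ===== Notes on version B (the rewrite author's own statement) =====
-- stated objective: alternative
-- what changed: Replaces the two-pass max()-then-list-comprehension-filter with a single fused traversal maintaining the best score, its first player id and a count of ties for the best.
import Mathlib
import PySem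

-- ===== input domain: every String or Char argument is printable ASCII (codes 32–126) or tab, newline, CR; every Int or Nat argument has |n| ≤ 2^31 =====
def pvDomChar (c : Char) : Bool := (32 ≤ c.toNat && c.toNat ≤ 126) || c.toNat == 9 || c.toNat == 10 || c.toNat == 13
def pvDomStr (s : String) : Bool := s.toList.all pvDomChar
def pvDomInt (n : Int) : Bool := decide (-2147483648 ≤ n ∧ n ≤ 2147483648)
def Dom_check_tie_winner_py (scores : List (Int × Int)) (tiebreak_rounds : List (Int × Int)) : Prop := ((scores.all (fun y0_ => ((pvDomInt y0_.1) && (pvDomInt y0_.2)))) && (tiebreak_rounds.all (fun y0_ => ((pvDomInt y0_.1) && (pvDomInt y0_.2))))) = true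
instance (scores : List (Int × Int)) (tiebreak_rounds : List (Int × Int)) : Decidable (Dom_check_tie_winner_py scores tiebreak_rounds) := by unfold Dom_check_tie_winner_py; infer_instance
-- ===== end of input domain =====

set_option maxRecDepth 8000

-- ===== PORT A =====
-- Port of A: guard on empty, max of the values, comprehension of all pids at the max, winner iff unique.
def check_tie_winner_py (scores : List (Int × Int)) (tiebreak_rounds : List (Int × Int)) : Option Int :=
  if tiebreak_rounds.isEmpty then none
  else
    match PySem.List.max? (tiebreak_rounds.map Prod.snd) (fun y => y) with
    | none => none
    | some max_score =>
      let winners := tiebreak_rounds.filterMap (fun p => if p.2 = max_score then some p.1 else none)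
      if winners.length = 1 then PySem.List.pyGet? winners 0 else none

-- ===== PORT B =====
-- Port of B: one fused pass keeping (best_pid, best_score, count of ties at the best).
def altLoop : List (Int × Int) → Int → Int → Nat → Option Int
  | [], best_pid, _, count => if count = 1 then some best_pid else none
  | (pid, s) :: rest, best_pid, best_score, count =>
    if best_score < s then altLoop rest pid s 1
    else if s = best_score then altLoop rest best_pid best_score (count + 1)
    else altLoop rest best_pid best_score count

def check_tie_winner_py_alt (scores : List (Int × Int)) (tiebreak_rounds : List (Int × Int)) : Option Int :=
  match tiebreak_rounds with
  | [] => none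
  | (pid, s) :: rest => altLoop rest pid s 1

-- ===== PRECONDITION & SPEC =====
def Spec_check_tie_winner_py (scores : List (Int × Int)) (tiebreak_rounds : List (Int × Int)) (out : Option Int) : Prop := out = check_tie_winner_py_alt scores tiebreak_rounds
instance (scores : List (Int × Int)) (tiebreak_rounds : List (Int × Int)) (out : Option Int) : Decidable (Spec_check_tie_winner_py scores tiebreak_rounds out) := by unfold Spec_check_tie_winner_py; infer_instance

-- ===== CLAIM (what is proved, stated in full; the proofs are below) =====
def Claim_equal_check_tie_winner_py : Prop := ∀ (scores : List (Int × Int)) (tiebreak_rounds : List (Int × Int)), Dom_check_tie_winner_py scores tiebreak_rounds → Spec_check_tie_winner_py scores tiebreak_rounds (check_tie_winner_py scores tiebreak_rounds)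

-- ===== LEMMAS AND PROOFS =====

-- running max of the scores, seeded with bs
def fmax (l : List (Int × Int)) (bs : Int) : Int := (l.map Prod.snd).foldl max bs

-- the pids scoring exactly m (A's "winners" comprehension)
def wlist (m : Int) (l : List (Int × Int)) : List Int :=
  l.filterMap (fun p => if p.2 = m then some p.1 else none)

theorem fmax_cons (pid s : Int) (rest : List (Int × Int)) (bs : Int) :
    fmax ((pid, s) :: rest) bs = fmax rest (max bs s) := by
  simp [fmax]

theorem le_fmax (l : List (Int × Int)) (bs : Int) : bs ≤ fmax l bs :=
  (PySem.List.le_foldl_max (l.map Prod.snd) bs).1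

theorem wlist_cons (m pid s : Int) (rest : List (Int × Int)) :
    wlist m ((pid, s) :: rest) =
      if s = m then pid :: wlist m rest else wlist m rest := by
  by_cases h : s = m <;> simp [wlist, List.filterMap, h]

-- the loop of B computes: unique-best iff exactly one item ties the running max
theorem altLoop_eq (l : List (Int × Int)) (bp bs : Int) (c : Nat) :
    altLoop l bp bs c =
      (if (if bs = fmax l bs then c else 0) + (wlist (fmax l bs) l).length = 1
       then (if bs = fmax l bs then some bp else (wlist (fmax l bs) l).head?)
       else none) := by
  induction l generalizing bp bs c with
  | nil => simp [altLoop, fmax, wlist]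
  | cons hd rest ih =>
    obtain ⟨pid, s⟩ := hd
    rw [fmax_cons, wlist_cons]
    by_cases h1 : bs < s
    · have hmax : max bs s = s := max_eq_right h1.le
      rw [hmax]
      have hne : bs ≠ fmax rest s := by
        have := le_fmax rest s
        intro h; omega
      rw [show altLoop ((pid, s) :: rest) bp bs c = altLoop rest pid s 1 from by
        simp [altLoop, h1]]
      rw [ih pid s 1]
      simp only [hne, if_false]
      by_cases h5 : s = fmax rest s
      · simp [← h5]
      · simp [h5]
    · have hmax : max bs s = bs := max_eq_left (by omega)
      rw [hmax]
      by_cases h2 : s = bs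
      · rw [show altLoop ((pid, s) :: rest) bp bs c = altLoop rest bp bs (c + 1) from by
          simp only [altLoop]; rw [if_neg h1, if_pos h2]]
        rw [ih bp bs (c + 1)]
        by_cases h3 : bs = fmax rest bs
        · simp [← h3, h2]
          split_ifs <;> first | rfl | omega
        · have h4 : ¬ (s = fmax rest bs) := by rw [h2]; exact h3
          simp [h3, h4]
      · rw [show altLoop ((pid, s) :: rest) bp bs c = altLoop rest bp bs c from by
          simp [altLoop, h1, h2]]
        rw [ih bp bs c]
        have h4 : ¬ (s = fmax rest bs) := by
          have := le_fmax rest bs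
          intro h; omega
        simp [h4]


-- ===== VERDICT (by name: the statement is the Claim_ definition above) =====
theorem check_tie_winner_py_spec : Claim_equal_check_tie_winner_py := by
  intro scores tiebreak_rounds _
  unfold Spec_check_tie_winner_py
  match tiebreak_rounds with
  | [] => rfl
  | (pid, s) :: rest =>
    rw [show check_tie_winner_py_alt scores ((pid, s) :: rest) = altLoop rest pid s 1 from rfl]
    rw [altLoop_eq]
    have hm : fmax rest s = fmax ((pid, s) :: rest) s := by
      rw [fmax_cons]; simp
    unfold check_tie_winner_py
    rw [show PySem.List.max? (((pid, s) :: rest).map Prod.snd) (fun y => y)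
          = some (fmax rest s) from by
      simp only [List.map]
      rw [PySem.List.max?_id_cons]
      rfl]
    simp only [List.isEmpty_cons, Bool.false_eq_true, if_false]
    have hw : ((pid, s) :: rest).filterMap
        (fun p => if p.2 = fmax rest s then some p.1 else none)
        = wlist (fmax rest s) ((pid, s) :: rest) := rfl
    rw [hw, wlist_cons]
    by_cases h1 : s = fmax rest s
    · simp [← h1]
    · simp only [if_neg h1, Nat.zero_add]
      by_cases h2 : (wlist (fmax rest s) rest).length = 1
      · obtain ⟨a, ha⟩ := List.length_eq_one_iff.mp h2
        rw [ha]
        simp [PySem.List.pyGet?, PySem.List.pyIdx?]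
      · simp [h2]
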